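-- pv_equiv track=rewrite | github.com/akoshochrein/hackerrank | algorithms/implementation/game-of-thrones-1.py | game_of_thrones_one
-- ===== SOURCE A (Python) =====
-- from collections import Counter
--
-- def game_of_thrones_one(key: str) -> str:
--     letter_frequencies = Counter(key)
--
--     odd_letters = 0
--     for letter in letter_frequencies.keys():
--         if letter_frequencies[letter] % 2 != 0:
--             odd_letters += 1
--
--     if odd_letters > 1:
--         return "NO"
--
--     return "YES"
-- ===== SOURCE B (Python) =====
-- def game_of_thrones_one(key: str) -> str:
--     odd = set()
--     for c in key:
--         if c in odd:
--             odd.remove(c)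
--         else:
--             odd.add(c)
--     return "NO" if len(odd) > 1 else "YES"
-- ===== Notes on version B (the rewrite author's own statement) =====
-- stated objective: idiomatic
-- what changed: Replaced building a Counter and then scanning its distinct keys with a %2 test by a single pass over the characters toggling membership in a set of odd-parity characters; the final set size is the odd-letter count.
import Mathlib
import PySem

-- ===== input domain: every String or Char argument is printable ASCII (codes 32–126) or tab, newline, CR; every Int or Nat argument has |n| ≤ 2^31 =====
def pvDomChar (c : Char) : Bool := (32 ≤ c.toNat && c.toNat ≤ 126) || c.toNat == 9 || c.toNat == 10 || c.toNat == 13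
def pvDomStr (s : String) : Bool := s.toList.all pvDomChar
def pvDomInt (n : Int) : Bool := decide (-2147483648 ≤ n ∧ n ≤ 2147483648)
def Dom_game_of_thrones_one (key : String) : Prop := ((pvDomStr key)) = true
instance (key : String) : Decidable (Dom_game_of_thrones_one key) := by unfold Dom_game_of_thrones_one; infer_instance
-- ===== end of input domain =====

-- B replaces Counter-then-scan-distinct-keys by one pass toggling a set of odd-parity characters (idiomatic, same cost).

-- ===== PORT A =====
def game_of_thrones_one (key : String) : String :=
  let letter_frequencies := PySem.Dict.counter key.toList
  let odd_letters :=
    letter_frequencies.keys.foldl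
      (fun acc letter =>
        if PySem.Int.mod (letter_frequencies.getD letter 0) 2 ≠ 0 then acc + 1 else acc)
      (0 : Int)
  if odd_letters > 1 then "NO" else "YES"

-- ===== PORT B =====
-- loop body of Source B: 'if c in odd: odd.remove(c) else: odd.add(c)' (remove? is some here, since c ∈ odd)
def gotToggle (s : PySem.Set Char) (c : Char) : PySem.Set Char :=
  if PySem.Set.contains s c then (PySem.Set.remove? s c).getD s else PySem.Set.add s c

def game_of_thrones_one_alt (key : String) : String :=
  let odd := key.toList.foldl gotToggle PySem.Set.empty
  if PySem.Set.len odd > 1 then "NO" else "YES"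

-- ===== PRECONDITION & SPEC =====
def Spec_game_of_thrones_one (key : String) (out : String) : Prop := out = game_of_thrones_one_alt key
instance (key : String) (out : String) : Decidable (Spec_game_of_thrones_one key out) := by unfold Spec_game_of_thrones_one; infer_instance

-- ===== CLAIM (what is proved, stated in full; the proofs are below) =====
def Claim_equal_game_of_thrones_one : Prop := ∀ (key : String), Dom_game_of_thrones_one key → Spec_game_of_thrones_one key (game_of_thrones_one key)

-- ===== LEMMAS AND PROOFS =====

-- invariant of B's loop: the set stays duplicate-free and holds exactly the characters whose
-- parity-so-far (initial membership xor parity of occurrences in the remainder) is odd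
theorem gotToggle_inv (l : List Char) (s : PySem.Set Char) (hs : s.Nodup) :
    (l.foldl gotToggle s).Nodup ∧
      ∀ c, c ∈ l.foldl gotToggle s ↔
        ((c ∈ s ∧ l.count c % 2 = 0) ∨ (c ∉ s ∧ l.count c % 2 = 1)) := by
  induction l generalizing s with
  | nil => simp [hs]
  | cons x t ih =>
    have hstep : gotToggle s x = if x ∈ s then s.discard x else s.add x := by
      by_cases hx : x ∈ s
      · simp [gotToggle, PySem.Set.remove?_of_mem hx, hx]
      · have hne : PySem.Set.contains s x ≠ true := fun h => hx ((PySem.Set.contains_iff s x).mp h)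
        simp [gotToggle, hx]
    have hs' : (gotToggle s x).Nodup := by
      rw [hstep]; split
      · exact PySem.Set.nodup_discard s x hs
      · exact PySem.Set.nodup_add s x hs
    obtain ⟨hn, hmem⟩ := ih (gotToggle s x) hs'
    refine ⟨by simpa using hn, fun c => ?_⟩
    have hmem' : c ∈ gotToggle s x ↔ ((c ∈ s ∧ c ≠ x) ∨ (c ∉ s ∧ c = x)) := by
      rw [hstep]
      by_cases hx : x ∈ s
      · simp only [hx, if_true, PySem.Set.mem_discard]
        constructor
        · rintro ⟨h1, h2⟩
          exact Or.inl ⟨h1, h2⟩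
        · rintro (⟨h1, h2⟩ | ⟨h1, h2⟩)
          · exact ⟨h1, h2⟩
          · exact absurd (h2 ▸ hx) h1
      · simp only [hx, if_false, PySem.Set.mem_add]
        constructor
        · rintro (h | h)
          · exact Or.inl ⟨h, fun e => hx (e ▸ h)⟩
          · exact Or.inr ⟨fun hc => hx (h ▸ hc), h⟩
        · rintro (⟨h1, h2⟩ | ⟨h1, h2⟩)
          · exact Or.inl h1
          · exact Or.inr h2
    rw [List.foldl_cons, hmem c, hmem', List.count_cons]
    by_cases hcx : c = x
    · subst hcx
      by_cases hcs : c ∈ s <;> simp [hcs] <;> omega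
    · have hxc : ¬(x = c) := fun h => hcx h.symm
      by_cases hcs : c ∈ s <;> simp [hcx, hxc, hcs]

-- B's final set has exactly the characters with odd total count
theorem gotSet_spec (l : List Char) :
    (l.foldl gotToggle PySem.Set.empty).Nodup ∧
      ∀ c, c ∈ l.foldl gotToggle PySem.Set.empty ↔ l.count c % 2 = 1 := by
  obtain ⟨hn, hm⟩ := gotToggle_inv l PySem.Set.empty List.nodup_nil
  refine ⟨hn, fun c => ?_⟩
  rw [hm c]
  simp [PySem.Set.empty]

-- A's per-key test is the odd-count test on the character counts of l
theorem gotA_pred (l : List Char) (c : Char) :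
    (PySem.Int.mod ((PySem.Dict.counter l).getD c 0) 2 ≠ 0) ↔ l.count c % 2 = 1 := by
  rw [PySem.Dict.getD_counter]
  have : PySem.Int.mod (l.count c : Int) 2 = ((l.count c % 2 : Nat) : Int) :=
    PySem.Int.mod_natCast _ _
  rw [this]
  omega

-- the two counts agree: A's odd-key count equals B's set size
theorem gotCount_eq (l : List Char) :
    (((PySem.Dict.counter l).keys.countP
        (fun c => decide (PySem.Int.mod ((PySem.Dict.counter l).getD c 0) 2 ≠ 0)) : Nat) : Int)
      = PySem.Set.len (l.foldl gotToggle PySem.Set.empty) := by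
  obtain ⟨hn, hm⟩ := gotSet_spec l
  rw [PySem.Dict.keys_counter, List.countP_eq_length_filter]
  have hperm : ((PySem.Set.ofList l).filter
      (fun c => decide (PySem.Int.mod ((PySem.Dict.counter l).getD c 0) 2 ≠ 0))).Perm
      (l.foldl gotToggle PySem.Set.empty) := by
    rw [List.perm_ext_iff_of_nodup (List.Nodup.filter _ (PySem.Set.nodup_ofList l)) hn]
    intro c
    rw [List.mem_filter, hm c]
    constructor
    · rintro ⟨_, h⟩
      exact (gotA_pred l c).mp (by simpa using h)
    · intro h
      refine ⟨(PySem.Set.mem_ofList l c).mpr ?_, by simpa using (gotA_pred l c).mpr h⟩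
      have : 0 < l.count c := by omega
      exact List.count_pos_iff.mp this
  rw [PySem.Set.len]
  exact_mod_cast congrArg Nat.cast hperm.length_eq

-- ===== VERDICT (by name: the statement is the Claim_ definition above) =====
theorem game_of_thrones_one_spec : Claim_equal_game_of_thrones_one := by
  intro key _
  unfold Spec_game_of_thrones_one game_of_thrones_one game_of_thrones_one_alt
  simp only
  have hfun : (fun (acc : Int) letter =>
        if PySem.Int.mod ((PySem.Dict.counter key.toList).getD letter 0) 2 ≠ 0 then acc + 1 else acc)
      = (fun (acc : Int) letter =>
        if (fun c => decide (PySem.Int.mod ((PySem.Dict.counter key.toList).getD c 0) 2 ≠ 0)) letter = true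
        then acc + 1 else acc) := by
    funext acc letter
    simp
  rw [hfun, PySem.List.foldl_count_if
    (fun c => decide (PySem.Int.mod ((PySem.Dict.counter key.toList).getD c 0) 2 ≠ 0))]
  rw [zero_add, gotCount_eq key.toList]
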